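-- pv_equiv track=rewrite | github.com/wjdghks9292/programmers | 1단계/이상한문자만들기.py | solution
-- ===== SOURCE A (Python) =====
-- def solution(s):
--     answer = ''
--     s_list = s.split(' ')
--
--     new_list = []
--     for i in s_list:
--         new_list.append(i.strip())
--
--     ans_list = []
--
--     for word in new_list:
--         ans_word = ''
--         for i, n in enumerate(word):
--             if i % 2 == 0:
--                 ans_word += n.upper()
--             else:
--                 ans_word += n.lower()
--
--         ans_list.append(ans_word)
--
--     return ' '.join(ans_list)
-- ===== SOURCE B (Python) =====
-- def solution(s):
--     out = []
--     for tok in s.split(' '):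
--         w = tok.strip()
--         pieces = []
--         for j in range(0, len(w) - 1, 2):
--             pieces.append(w[j].upper() + w[j + 1].lower())
--         if len(w) % 2 == 1:
--             pieces.append(w[-1].upper())
--         out.append(''.join(pieces))
--     return ' '.join(out)
-- ===== Notes on version B (the rewrite author's own statement) =====
-- stated objective: alternative
-- what changed: Replaces A's per-character enumerate loop with a modulo branch on every index by a pairwise pass: one step-2 index loop that emits an (uppercased, lowercased) pair per step plus one leftover uppercased character for odd-length words.
import Mathlib
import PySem

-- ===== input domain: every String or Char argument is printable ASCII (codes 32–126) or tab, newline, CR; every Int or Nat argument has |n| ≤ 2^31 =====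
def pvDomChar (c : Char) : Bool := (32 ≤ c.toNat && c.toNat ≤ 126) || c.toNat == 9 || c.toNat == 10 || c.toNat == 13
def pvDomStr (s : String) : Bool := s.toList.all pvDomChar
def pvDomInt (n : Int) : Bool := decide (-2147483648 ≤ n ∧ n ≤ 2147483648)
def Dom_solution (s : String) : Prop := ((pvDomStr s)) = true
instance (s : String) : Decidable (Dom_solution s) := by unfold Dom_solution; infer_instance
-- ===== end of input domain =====

-- B replaces A's per-character modulo-branched loop by a pairwise pass: step-2 indices handle
-- (even, odd) character pairs at once, with one leftover even character; objective: alternative.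

-- ===== PORT A =====
-- ans_word += n.upper() / n.lower() ported on the code-point list (String.ofList at the end).
def solution (s : String) : String :=
  let s_list := (PySem.Str.split? s " ").getD []
  let new_list := s_list.foldl (fun acc i => acc ++ [PySem.Str.strip i]) []
  let ans_list := new_list.foldl (fun acc word =>
    let ans_word := (PySem.List.enumerate word.toList 0).foldl
      (fun aw p => aw ++ (if PySem.Int.mod p.1 2 == 0
                          then [PySem.Chars.upperChar p.2]
                          else [PySem.Chars.lowerChar p.2])) []
    acc ++ [String.ofList ans_word]) []
  PySem.Str.join " " ans_list

-- ===== PORT B =====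
-- per-word pairwise pass of Source B; w[j] / w[j+1] / w[-1] are always in range on the indices the
-- loop produces, so pyGetD's default ' ' is never used.
def fixWordB (w : String) : String :=
  let cs := w.toList
  let pieces := (PySem.List.pyRange 0 ((cs.length : Int) - 1) 2).foldl
    (fun ps j => ps ++ [String.ofList
      [PySem.Chars.upperChar (PySem.List.pyGetD cs j ' '),
       PySem.Chars.lowerChar (PySem.List.pyGetD cs (j + 1) ' ')]]) []
  let pieces := if PySem.Int.mod (cs.length : Int) 2 == 1
    then pieces ++ [String.ofList [PySem.Chars.upperChar (PySem.List.pyGetD cs (-1) ' ')]]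
    else pieces
  PySem.Str.join "" pieces

def solution_alt (s : String) : String :=
  PySem.Str.join " "
    (((PySem.Str.split? s " ").getD []).map (fun tok => fixWordB (PySem.Str.strip tok)))

-- ===== PRECONDITION & SPEC =====
def Spec_solution (s : String) (out : String) : Prop := out = solution_alt s
instance (s : String) (out : String) : Decidable (Spec_solution s out) := by unfold Spec_solution; infer_instance

-- ===== CLAIM (what is proved, stated in full; the proofs are below) =====
def Claim_equal_solution : Prop := ∀ (s : String), Dom_solution s → Spec_solution s (solution s)

-- ===== LEMMAS AND PROOFS =====

-- hub: the intended per-word transform, two characters at a time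
def fixR : List Char → List Char
  | [] => []
  | [a] => [PySem.Chars.upperChar a]
  | a :: b :: r => PySem.Chars.upperChar a :: PySem.Chars.lowerChar b :: fixR r

theorem foldl_app {α β : Type} (g : α → List β) :
    ∀ (l : List α) (acc : List β),
      l.foldl (fun a x => a ++ g x) acc = acc ++ l.flatMap g := by
  intro l
  induction l with
  | nil => simp
  | cons x t ih => intro acc; simp [List.foldl, ih]

def gA (p : Int × Char) : List Char :=
  if PySem.Int.mod p.1 2 == 0 then [PySem.Chars.upperChar p.2] else [PySem.Chars.lowerChar p.2]

theorem mod2_natCast (n : Nat) : PySem.Int.mod ((n : Nat) : Int) 2 = ((n % 2 : Nat) : Int) := by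
  simp [PySem.Int.mod, Int.fmod_eq_emod]

theorem enum_shift (l : List Char) :
    ∀ (k : Int), (PySem.List.enumerate l (k + 2)).flatMap gA
      = (PySem.List.enumerate l k).flatMap gA := by
  induction l with
  | nil => intro k; simp [PySem.List.enumerate]
  | cons x t ih =>
      intro k
      have h : k + 2 + 1 = (k + 1) + 2 := by ring
      simp [PySem.List.enumerate_cons, gA, h, ih (k + 1)]

theorem A_word (w : List Char) : (PySem.List.enumerate w 0).flatMap gA = fixR w := by
  induction w using fixR.induct with
  | case1 => simp [PySem.List.enumerate, fixR]
  | case2 a => simp [PySem.List.enumerate, gA, PySem.Int.mod, fixR]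
  | case3 a b r ih =>
      have h2 : (0 : Int) + 1 + 1 = 0 + 2 := by ring
      simp only [PySem.List.enumerate_cons, List.flatMap_cons, h2, enum_shift r 0, ih, fixR]
      simp [gA, PySem.Int.mod]

-- pyRange 0 b 2 as a mapped List.range
theorem pyRange02 (b : Int) :
    PySem.List.pyRange 0 b 2 = (List.range ((b + 1) / 2).toNat).map (fun k : Nat => (2 * k : Int)) := by
  have hcnt : (if (0 : Int) < b then ((b - 0 + 2 - 1) / 2).toNat else 0) = ((b + 1) / 2).toNat := by
    by_cases h : (0 : Int) < b
    · rw [if_pos h]; congr 1; ring_nf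
    · rw [if_neg h]; omega
  unfold PySem.List.pyRange
  rw [if_neg (by norm_num)]
  simp only [show ((0 : Int) < 2) = True from by norm_num, if_true, hcnt]
  exact List.map_congr_left (fun k _ => by ring)

def pcB (cs : List Char) (j : Int) : List Char :=
  [PySem.Chars.upperChar (PySem.List.pyGetD cs j ' '),
   PySem.Chars.lowerChar (PySem.List.pyGetD cs (j + 1) ' ')]

def pcN (cs : List Char) (k : Nat) : List Char :=
  [PySem.Chars.upperChar (cs.getD (2 * k) ' '),
   PySem.Chars.lowerChar (cs.getD (2 * k + 1) ' ')]

theorem pcB_eq (cs : List Char) (k : Nat) : pcB cs (2 * (k : Int)) = pcN cs k := by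
  unfold pcB pcN
  rw [show (2 * (k : Int)) = ((2 * k : Nat) : Int) from by norm_num,
      PySem.List.pyGetD_natCast,
      show ((2 * k : Nat) : Int) + 1 = ((2 * k + 1 : Nat) : Int) from by norm_num,
      PySem.List.pyGetD_natCast]

theorem pcN_cons (a b : Char) (r : List Char) (k : Nat) :
    pcN (a :: b :: r) (k + 1) = pcN r k := by
  unfold pcN
  rw [show 2 * (k + 1) = (2 * k + 1) + 1 from by ring,
      show (2 * k + 1) + 1 + 1 = (2 * k + 1 + 1) + 1 from rfl]
  simp

theorem pyGetD_last (cs : List Char) (h : cs ≠ []) (d : Char) :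
    PySem.List.pyGetD cs (-1) d = cs.getLast h := by
  have hn : 0 < cs.length := List.length_pos_iff.mpr h
  unfold PySem.List.pyGetD PySem.List.pyGet? PySem.List.pyIdx?
  rw [if_neg (by norm_num), if_pos (by omega)]
  have hk : cs.length - ((-(-1 : Int)).toNat) = cs.length - 1 := by norm_num
  rw [hk]
  simp [List.getLast_eq_getElem]
  rw [List.getElem?_eq_getElem (by omega)]
  simp

theorem B_core : ∀ cs : List Char,
    (List.range (cs.length / 2)).flatMap (pcN cs)
      ++ (if cs.length % 2 = 1
          then [PySem.Chars.upperChar (cs.getLast?.getD ' ')] else [])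
      = fixR cs := by
  intro cs
  induction cs using fixR.induct with
  | case1 => simp [fixR]
  | case2 a => simp [fixR]
  | case3 a b r ih =>
      have hlen : (a :: b :: r).length = r.length + 2 := by simp
      have hdiv : (r.length + 2) / 2 = r.length / 2 + 1 := by omega
      have hmod : (r.length + 2) % 2 = r.length % 2 := by omega
      rw [hlen, hdiv, hmod, List.range_succ_eq_map]
      have hhead : pcN (a :: b :: r) 0 = [PySem.Chars.upperChar a, PySem.Chars.lowerChar b] := by
        simp [pcN]
      have htail : (if r.length % 2 = 1
            then [PySem.Chars.upperChar ((a :: b :: r).getLast?.getD ' ')] else [])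
          = (if r.length % 2 = 1
            then [PySem.Chars.upperChar (r.getLast?.getD ' ')] else []) := by
        by_cases hodd : r.length % 2 = 1
        · rcases r with _ | ⟨c, r'⟩
          · simp at hodd
          · simp
        · simp [hodd]
      rw [htail]
      simp only [List.flatMap_cons, hhead, List.flatMap_map]
      simp only [Nat.succ_eq_add_one, pcN_cons]
      simp [fixR, ← ih]

theorem B_word (cs : List Char) :
    (PySem.List.pyRange 0 ((cs.length : Int) - 1) 2).flatMap (pcB cs)
      ++ (if PySem.Int.mod (cs.length : Int) 2 == 1
          then [PySem.Chars.upperChar (PySem.List.pyGetD cs (-1) ' ')] else [])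
      = fixR cs := by
  have hcnt : (((cs.length : Int) - 1 + 1) / 2).toNat = cs.length / 2 := by omega
  rw [pyRange02, hcnt, List.flatMap_map]
  simp only [pcB_eq]
  have hmod : (PySem.Int.mod (cs.length : Int) 2 == 1) = decide (cs.length % 2 = 1) := by
    rw [mod2_natCast]
    rcases Nat.mod_two_eq_zero_or_one cs.length with h | h <;> simp [h]
  rw [hmod]
  by_cases hodd : cs.length % 2 = 1
  · have hne : cs ≠ [] := by intro h0; subst h0; simp at hodd
    rw [pyGetD_last cs hne]
    have hl : cs.getLast?.getD ' ' = cs.getLast hne := by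
      simp [List.getLast?_eq_some_getLast hne]
    simp only [hodd, decide_true, if_true, ← B_core cs, hl]
  · simp only [hodd, decide_false, if_false, ← B_core cs]
    simp

theorem flatten_map_singleton {α β : Type} (g : α → β) :
    ∀ (l : List α), (l.map (fun x => [g x])).flatten = l.map g := by
  intro l
  induction l with
  | nil => simp
  | cons x t ih => simp [ih]

theorem flatten_intersperse_nil : ∀ (parts : List (List Char)),
    (List.intersperse ([] : List Char) parts).flatten = parts.flatten
  | [] => by simp
  | [x] => by simp
  | x :: y :: t => by
      have h : List.intersperse ([] : List Char) (x :: y :: t)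
          = x :: [] :: List.intersperse [] (y :: t) := rfl
      rw [h]
      simp [flatten_intersperse_nil (y :: t)]

theorem join_empty_flatten (parts : List (List Char)) :
    PySem.Chars.join [] parts = parts.flatten := by
  simp [PySem.Chars.join, List.intercalate, flatten_intersperse_nil]

theorem word_eq (w : String) :
    String.ofList ((PySem.List.enumerate w.toList 0).foldl
      (fun aw p => aw ++ (if PySem.Int.mod p.1 2 == 0
                          then [PySem.Chars.upperChar p.2]
                          else [PySem.Chars.lowerChar p.2])) [])
      = fixWordB w := by
  have hA : (PySem.List.enumerate w.toList 0).foldl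
      (fun aw p => aw ++ (if PySem.Int.mod p.1 2 == 0
                          then [PySem.Chars.upperChar p.2]
                          else [PySem.Chars.lowerChar p.2])) [] = fixR w.toList := by
    have h := foldl_app gA (PySem.List.enumerate w.toList 0) []
    simp only [gA] at h
    rw [h, A_word]
    simp
  rw [hA]
  unfold fixWordB
  simp only []
  apply String.toList_injective
  rw [PySem.Str.toList_join]
  by_cases hodd : PySem.Int.mod ((w.toList.length : Int)) 2 == 1
  · rw [if_pos hodd]
    rw [foldl_app (fun j => [String.ofList
      [PySem.Chars.upperChar (PySem.List.pyGetD w.toList j ' '),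
       PySem.Chars.lowerChar (PySem.List.pyGetD w.toList (j + 1) ' ')]])]
    rw [← B_word w.toList, if_pos hodd]
    simp [join_empty_flatten, List.flatMap_def, Function.comp_def]
    rw [show (fun x : Int => [[PySem.Chars.upperChar (PySem.List.pyGetD w.toList x ' '),
          PySem.Chars.lowerChar (PySem.List.pyGetD w.toList (x + 1) ' ')]])
        = (fun x : Int => [pcB w.toList x]) from rfl,
      flatten_map_singleton (pcB w.toList)]
  · rw [if_neg (by simpa using hodd)]
    rw [foldl_app (fun j => [String.ofList
      [PySem.Chars.upperChar (PySem.List.pyGetD w.toList j ' '),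
       PySem.Chars.lowerChar (PySem.List.pyGetD w.toList (j + 1) ' ')]])]
    rw [← B_word w.toList, if_neg (by simpa using hodd)]
    simp [join_empty_flatten, List.flatMap_def, Function.comp_def]
    rw [show (fun x : Int => [[PySem.Chars.upperChar (PySem.List.pyGetD w.toList x ' '),
          PySem.Chars.lowerChar (PySem.List.pyGetD w.toList (x + 1) ' ')]])
        = (fun x : Int => [pcB w.toList x]) from rfl,
      flatten_map_singleton (pcB w.toList)]

theorem A_outer (l : List String) (acc : List String) :
    l.foldl (fun acc word => acc ++ [String.ofList ((PySem.List.enumerate word.toList 0).foldl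
      (fun aw p => aw ++ (if PySem.Int.mod p.1 2 == 0
                          then [PySem.Chars.upperChar p.2]
                          else [PySem.Chars.lowerChar p.2])) [])]) acc
      = acc ++ l.map (fun word => String.ofList ((PySem.List.enumerate word.toList 0).foldl
      (fun aw p => aw ++ (if PySem.Int.mod p.1 2 == 0
                          then [PySem.Chars.upperChar p.2]
                          else [PySem.Chars.lowerChar p.2])) [])) := by
  induction l generalizing acc with
  | nil => simp
  | cons x t ih =>
      rw [List.foldl_cons, ih]
      simp

-- ===== VERDICT (by name: the statement is the Claim_ definition above) =====
theorem solution_spec : Claim_equal_solution := by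
  intro s _
  unfold Spec_solution solution solution_alt
  simp only []
  rw [foldl_app (fun i => [PySem.Str.strip i]), A_outer]
  simp only [List.nil_append, List.flatMap_def, flatten_map_singleton, List.map_map,
    Function.comp_def]
  exact congrArg (PySem.Str.join " ") (List.map_congr_left (fun tok _ => word_eq (PySem.Str.strip tok)))
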